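-- pv_equiv track=rewrite | github.com/Gallo13th/RNACG | models/inversefold2d.py | ss2edge
-- ===== SOURCE A (Python) =====
-- def ss2pair(target_ss):
--     pair_edges = []
--     for i in range(len(target_ss)):
--         if target_ss[i] == '(':
--             for j in range(i+1,len(target_ss)):
--                 if target_ss[j] == ')':
--                     pair_edges.append([i,j])
--                     pair_edges.append([j,i])
--                     target_ss = target_ss[:i] + '.' + target_ss[i+1:j] + '.' + target_ss[j+1:]
--                     break
--         if target_ss[i] == '[':
--             for j in range(i+1,len(target_ss)):
--                 if target_ss[j] == ']':
--                     pair_edges.append([i,j])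
--                     pair_edges.append([j,i])
--                     target_ss = target_ss[:i] + '.' + target_ss[i+1:j] + '.' + target_ss[j+1:]
--                     break
--         if target_ss[i] == '{':
--             for j in range(i+1,len(target_ss)):
--                 if target_ss[j] == '}':
--                     pair_edges.append([i,j])
--                     pair_edges.append([j,i])
--                     target_ss = target_ss[:i] + '.' + target_ss[i+1:j] + '.' + target_ss[j+1:]
--                     break
--         if target_ss[i] == '<':
--             for j in range(i+1,len(target_ss)):
--                 if target_ss[j] == '>':
--                     pair_edges.append([i,j])
--                     pair_edges.append([j,i])
--                     target_ss = target_ss[:i] + '.' + target_ss[i+1:j] + '.' + target_ss[j+1:]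
--                     break
--     return pair_edges
--
-- def ss2edge(target_ss):
--     edge = []
--     edge_attr = []
--     edge += [[i,i+1] for i in range(len(target_ss)-1)]
--     edge_attr += [[0,0] for i in range(len(target_ss)-1)]
--     edge += [[i+1,i] for i in range(len(target_ss)-1)]
--     edge_attr += [[0,0] for i in range(len(target_ss)-1)]
--     pair_edges = ss2pair(target_ss)
--     for pair in pair_edges:
--         edge.append(pair)
--         edge_attr.append([1,1])
--     return edge,edge_attr
-- ===== SOURCE B (Python) =====
-- def ss2edge(target_ss):
--     n = len(target_ss)
--     pairs = []
--     for op, cl in (('(', ')'), ('[', ']'), ('{', '}'), ('<', '>')):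
--         opens = [i for i, c in enumerate(target_ss) if c == op]
--         closes = [i for i, c in enumerate(target_ss) if c == cl]
--         k = 0
--         for o in opens:
--             while k < len(closes) and closes[k] <= o:
--                 k += 1
--             if k == len(closes):
--                 break
--             pairs.append((o, closes[k]))
--             k += 1
--     pairs.sort(key=lambda p: p[0])
--     edge = [[i, i + 1] for i in range(n - 1)] + [[i + 1, i] for i in range(n - 1)]
--     edge_attr = [[0, 0] for _ in range(2 * (n - 1))]
--     for i, j in pairs:
--         edge += [[i, j], [j, i]]
--         edge_attr += [[1, 1], [1, 1]]
--     return edge, edge_attr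
-- ===== Notes on version B (the rewrite author's own statement) =====
-- stated objective: alternative
-- what changed: Replaces the scan-and-rewrite bracket matching (for each open, rescan the string for the next close and rebuild the whole string with slices) by per-bracket-type two-pointer greedy matching of the open/close position lists, then a sort of the matched pairs by open index.
import Mathlib
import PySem

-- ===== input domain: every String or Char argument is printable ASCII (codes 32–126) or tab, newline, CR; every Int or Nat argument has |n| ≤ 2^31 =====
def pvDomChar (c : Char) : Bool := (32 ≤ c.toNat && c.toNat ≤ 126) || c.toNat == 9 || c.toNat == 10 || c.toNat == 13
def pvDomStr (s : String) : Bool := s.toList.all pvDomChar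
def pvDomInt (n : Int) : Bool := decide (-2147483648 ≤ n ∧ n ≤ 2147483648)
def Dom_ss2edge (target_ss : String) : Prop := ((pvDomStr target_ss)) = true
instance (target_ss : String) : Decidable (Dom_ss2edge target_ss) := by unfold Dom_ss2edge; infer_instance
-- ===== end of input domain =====

-- B replaces A's scan-and-rewrite bracket matching by per-type two-pointer matching of the
-- open/close position lists plus one sort of the pairs by open index (objective: alternative).

-- ===== PORT A =====
-- inner 'for j in range(i+1, len)) ... break' of ss2pair: first j with s[j]==cl
def pvFindClose (s : List Char) (cl : Char) : List Int → Option Int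
  | [] => none
  | j :: js => if PySem.List.pyGetD s j '?' = cl then some j else pvFindClose s cl js

-- one 'if target_ss[i] == op: for j ...' block of ss2pair
def pvBlock (op cl : Char) (st : List (List Int) × List Char) (i : Int) : List (List Int) × List Char :=
  if PySem.List.pyGetD st.2 i '?' = op then
    match pvFindClose st.2 cl (PySem.List.pyRange (i + 1) (st.2.length : Int) 1) with
    | some j =>
        (st.1 ++ [[i, j], [j, i]],
         PySem.List.slice st.2 none (some i) ++ ['.']
           ++ PySem.List.slice st.2 (some (i + 1)) (some j) ++ ['.']
           ++ PySem.List.slice st.2 (some (j + 1)) none)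
    | none => st
  else st

def pvSS2pair (cs : List Char) : List (List Int) :=
  ((PySem.List.pyRange 0 (cs.length : Int) 1).foldl
    (fun st i => pvBlock '<' '>' (pvBlock '{' '}' (pvBlock '[' ']' (pvBlock '(' ')' st i) i) i) i)
    ([], cs)).1

def ss2edge (target_ss : String) : List (List Int) × List (List Int) :=
  let cs := target_ss.toList
  let n : Int := (cs.length : Int)
  let edge := (PySem.List.pyRange 0 (n - 1) 1).map (fun i => [i, i + 1])
  let edge_attr := (PySem.List.pyRange 0 (n - 1) 1).map (fun _ => ([0, 0] : List Int))
  let edge2 := edge ++ (PySem.List.pyRange 0 (n - 1) 1).map (fun i => [i + 1, i])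
  let edge_attr2 := edge_attr ++ (PySem.List.pyRange 0 (n - 1) 1).map (fun _ => ([0, 0] : List Int))
  let pair_edges := pvSS2pair cs
  pair_edges.foldl (fun st pr => (st.1 ++ [pr], st.2 ++ [[1, 1]])) (edge2, edge_attr2)

-- ===== PORT B =====
-- pvOcc, pvTpm and ss2edge_alt transliterate Source B: position lists per bracket type,
-- two-pointer greedy match, then sort by open index
def pvOcc (c : Char) (cs : List Char) : List Int :=
  ((PySem.List.enumerate cs 0).filter (fun p => p.2 == c)).map (fun p => p.1)

def pvTpm : List Int → List Int → List (Int × Int)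
  | [], _ => []
  | _ :: _, [] => []
  | o :: os, c :: cs => if c ≤ o then pvTpm (o :: os) cs else (o, c) :: pvTpm os cs
termination_by os cs => os.length + cs.length

def ss2edge_alt (target_ss : String) : List (List Int) × List (List Int) :=
  let cs := target_ss.toList
  let n : Int := (cs.length : Int)
  let pairs := pvTpm (pvOcc '(' cs) (pvOcc ')' cs) ++ pvTpm (pvOcc '[' cs) (pvOcc ']' cs)
      ++ pvTpm (pvOcc '{' cs) (pvOcc '}' cs) ++ pvTpm (pvOcc '<' cs) (pvOcc '>' cs)
  let sortedPairs := PySem.List.sorted pairs (fun p => p.1) false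
  let edge := (PySem.List.pyRange 0 (n - 1) 1).map (fun i => [i, i + 1])
      ++ (PySem.List.pyRange 0 (n - 1) 1).map (fun i => [i + 1, i])
  let edge_attr := (PySem.List.pyRange 0 (2 * (n - 1)) 1).map (fun _ => ([0, 0] : List Int))
  sortedPairs.foldl (fun st p => (st.1 ++ [[p.1, p.2], [p.2, p.1]], st.2 ++ [[1, 1], [1, 1]]))
    (edge, edge_attr)

-- ===== PRECONDITION & SPEC =====
def Spec_ss2edge (target_ss : String) (out : List (List Int) × List (List Int)) : Prop := out = ss2edge_alt target_ss
instance (target_ss : String) (out : List (List Int) × List (List Int)) : Decidable (Spec_ss2edge target_ss out) := by unfold Spec_ss2edge; infer_instance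

-- ===== CLAIM (what is proved, stated in full; the proofs are below) =====
def Claim_equal_ss2edge : Prop := ∀ (target_ss : String), Dom_ss2edge target_ss → Spec_ss2edge target_ss (ss2edge target_ss)

-- ===== LEMMAS AND PROOFS =====
-- ========== proof-side model (Nat world) ==========

-- positions (offset k) of character c in s
def pvOccN (c : Char) : List Char → Nat → List Nat
  | [], _ => []
  | x :: xs, k => if x = c then k :: pvOccN c xs (k + 1) else pvOccN c xs (k + 1)

def pvTpmN : List Nat → List Nat → List (Nat × Nat)
  | [], _ => []
  | _ :: _, [] => []
  | o :: os, c :: cs => if c ≤ o then pvTpmN (o :: os) cs else (o, c) :: pvTpmN os cs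
termination_by os cs => os.length + cs.length

def pvFindFrom (s : List Char) (cl : Char) (j : Nat) : Option Nat :=
  if h : j < s.length then
    (if s[j] = cl then some j else pvFindFrom s cl (j + 1))
  else none
termination_by s.length - j

def pvBlank2 (s : List Char) (i j : Nat) : List Char := (s.set i '.').set j '.'

-- close char for an open char
def pvOC (c : Char) : Option Char :=
  if c = '(' then some ')' else if c = '[' then some ']'
  else if c = '{' then some '}' else if c = '<' then some '>' else none

def pvG (s : List Char) (i : Nat) : List (Nat × Nat) :=
  if h : i < s.length then
    match pvOC s[i] with
    | some cl =>
      match pvFindFrom s cl (i + 1) with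
      | some j => (i, j) :: pvG (pvBlank2 s i j) (i + 1)
      | none => pvG s (i + 1)
    | none => pvG s (i + 1)
  else []
termination_by s.length - i
decreasing_by all_goals (first | (simp only [pvBlank2, List.length_set]; omega) | omega)

def pvSpecN (s : List Char) (i : Nat) : List (Nat × Nat) :=
  pvTpmN ((pvOccN '(' s 0).filter (fun q => i ≤ q)) (pvOccN ')' s 0)
  ++ pvTpmN ((pvOccN '[' s 0).filter (fun q => i ≤ q)) (pvOccN ']' s 0)
  ++ pvTpmN ((pvOccN '{' s 0).filter (fun q => i ≤ q)) (pvOccN '}' s 0)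
  ++ pvTpmN ((pvOccN '<' s 0).filter (fun q => i ≤ q)) (pvOccN '>' s 0)

def pvCast (p : Nat × Nat) : Int × Int := (Int.ofNat p.1, Int.ofNat p.2)

def pvCastL (l : List Nat) : List Int := l.map Int.ofNat

theorem pvCastL_cons (x : Nat) (l : List Nat) : pvCastL (x :: l) = Int.ofNat x :: pvCastL l := rfl

def pvExpand (l : List (Int × Int)) : List (List Int) :=
  l.flatMap (fun p => [[p.1, p.2], [p.2, p.1]])

-- ========== occN lemmas ==========

theorem pvOccN_mem (c : Char) (s : List Char) (k q : Nat) :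
    q ∈ pvOccN c s k ↔ ∃ (j : Nat), ∃ (h : j < s.length), q = k + j ∧ s[j] = c := by
  induction s generalizing k with
  | nil => simp [pvOccN]
  | cons x xs ih =>
    simp only [pvOccN]
    constructor
    · intro h
      split at h
      · rcases List.mem_cons.mp h with h | h
        · exact ⟨0, by simp, by omega, by simpa using ‹x = c›⟩
        · rcases (ih (k+1)).mp h with ⟨j, hj, hq, hc⟩
          exact ⟨j + 1, by simpa using hj, by omega, by simpa using hc⟩
      · rcases (ih (k+1)).mp h with ⟨j, hj, hq, hc⟩
        exact ⟨j + 1, by simpa using hj, by omega, by simpa using hc⟩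
    · rintro ⟨j, hj, hq, hc⟩
      cases j with
      | zero =>
        simp only [List.getElem_cons_zero] at hc
        simp [hc, hq]
      | succ j' =>
        have hm : q ∈ pvOccN c xs (k + 1) :=
          (ih (k+1)).mpr ⟨j', by simpa using hj, by omega, by simpa using hc⟩
        split <;> simp [hm]

theorem pvOccN_lb {c : Char} {s : List Char} {k q : Nat} (h : q ∈ pvOccN c s k) : k ≤ q := by
  rcases (pvOccN_mem c s k q).mp h with ⟨j, hj, hq, _⟩; omega

theorem pvOccN_pairwise (c : Char) (s : List Char) (k : Nat) :
    (pvOccN c s k).Pairwise (· < ·) := by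
  induction s generalizing k with
  | nil => simp [pvOccN]
  | cons x xs ih =>
    simp only [pvOccN]
    split
    · exact List.Pairwise.cons (fun q hq => by have := pvOccN_lb hq; omega) (ih (k+1))
    · exact ih (k+1)

theorem pvOccN_set {c x : Char} (hx : x ≠ c) (s : List Char) (p k : Nat) :
    pvOccN c (s.set p x) k = (pvOccN c s k).filter (fun q => q ≠ k + p) := by
  induction s generalizing p k with
  | nil => simp [pvOccN]
  | cons a xs ih =>
    cases p with
    | zero =>
      simp only [List.set_cons_zero, pvOccN, if_neg hx]
      split
      · rw [List.filter_cons]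
        simp only [Nat.add_zero, decide_eq_true_eq]
        rw [if_neg (by simp)]
        symm
        apply List.filter_eq_self.mpr
        intro q hq
        have := pvOccN_lb hq
        simp; omega
      · symm
        apply List.filter_eq_self.mpr
        intro q hq
        have := pvOccN_lb hq
        simp; omega
    | succ p' =>
      simp only [List.set_cons_succ, pvOccN]
      have hrec := ih p' (k + 1)
      have harith : (k + 1) + p' = k + (p' + 1) := by omega
      split
      · rw [List.filter_cons]
        simp only [decide_eq_true_eq]
        rw [if_pos (by omega)]
        rw [hrec, harith]
      · rw [hrec, harith]

theorem pvFilter_not_mem {l : List Nat} {v : Nat} (h : v ∉ l) :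
    l.filter (fun q => q ≠ v) = l := by
  apply List.filter_eq_self.mpr
  intro q hq
  simp
  exact fun hv => h (hv ▸ hq)

theorem pvFilter_ge_cons {l : List Nat} {i : Nat} (hp : l.Pairwise (· < ·)) (hm : i ∈ l) :
    l.filter (fun q => i ≤ q) = i :: l.filter (fun q => i + 1 ≤ q) := by
  induction l with
  | nil => simp at hm
  | cons a t ih =>
    rcases List.mem_cons.mp hm with rfl | hm
    · rw [List.filter_cons, if_pos (by simp)]
      congr 1
      rw [List.filter_cons, if_neg (by simp)]
      apply List.filter_congr
      intro q hq
      have := (List.pairwise_cons.mp hp).1 q hq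
      simp; omega
    · have hlt := (List.pairwise_cons.mp hp).1 i hm
      rw [List.filter_cons, if_neg (by simp; omega), List.filter_cons, if_neg (by simp; omega)]
      exact ih (List.pairwise_cons.mp hp).2 hm

theorem pvFilter_ge_shift {l : List Nat} {i : Nat} (hm : i ∉ l) :
    l.filter (fun q => i ≤ q) = l.filter (fun q => i + 1 ≤ q) := by
  apply List.filter_congr
  intro q hq
  have : q ≠ i := fun h => hm (h ▸ hq)
  simp; omega

theorem pvFilter_split (l : List Nat) (v : Nat) (hp : l.Pairwise (· < ·)) :
    l = l.filter (fun q => q < v) ++ l.filter (fun q => v ≤ q) := by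
  induction l with
  | nil => simp
  | cons a t ih =>
    rw [List.filter_cons, List.filter_cons]
    by_cases h : a < v
    · rw [if_pos (by simpa), if_neg (by simp; omega)]
      simpa using ih (List.pairwise_cons.mp hp).2
    · have h2 : v ≤ a := by omega
      rw [if_neg (by simpa), if_pos (by simpa using h2)]
      have htail : t.filter (fun q => decide (q < v)) = [] := by
        apply List.filter_eq_nil_iff.mpr
        intro q hq
        have := (List.pairwise_cons.mp hp).1 q hq
        simp; omega
      have htail2 : t.filter (fun q => decide (v ≤ q)) = t := by
        apply List.filter_eq_self.mpr
        intro q hq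
        have := (List.pairwise_cons.mp hp).1 q hq
        simp; omega
      rw [htail, htail2]
      simp

theorem pvTpmN_nil_r (os : List Nat) : pvTpmN os [] = [] := by
  cases os <;> simp [pvTpmN]

theorem pvTpmN_skip {pre : List Nat} {os cs : List Nat}
    (h : ∀ c ∈ pre, ∀ o ∈ os, c ≤ o) : pvTpmN os (pre ++ cs) = pvTpmN os cs := by
  induction pre with
  | nil => simp
  | cons c pre' ih =>
    cases os with
    | nil => simp [pvTpmN]
    | cons o os' =>
      have hco : c ≤ o := h c (by simp) o (by simp)
      simp only [List.cons_append, pvTpmN, if_pos hco]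
      exact ih (fun c' hc' => h c' (by simp [hc']))

-- ========== findFrom characterization ==========

theorem pvFindFrom_eq (s : List Char) (cl : Char) (j : Nat) :
    pvFindFrom s cl j = ((pvOccN cl s 0).filter (fun q => j ≤ q)).head? := by
  rw [pvFindFrom]
  split
  · rename_i h
    split
    · rename_i hc
      have hm : j ∈ pvOccN cl s 0 := (pvOccN_mem cl s 0 j).mpr ⟨j, h, by omega, hc⟩
      rw [pvFilter_ge_cons (pvOccN_pairwise cl s 0) hm]
      simp
    · rename_i hc
      have hm : j ∉ pvOccN cl s 0 := by
        intro hmem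
        rcases (pvOccN_mem cl s 0 j).mp hmem with ⟨j', hj', hq, hcc⟩
        exact hc (by omega ▸ hcc ▸ (by subst hq; simpa using hcc))
      rw [pvFilter_ge_shift hm]
      exact pvFindFrom_eq s cl (j + 1)
  · rename_i h
    symm
    rw [List.head?_eq_none_iff]
    apply List.filter_eq_nil_iff.mpr
    intro q hq
    rcases (pvOccN_mem cl s 0 q).mp hq with ⟨j', hj', hqe, _⟩
    simp; omega
termination_by s.length - j

-- ========== G lemmas ==========

theorem pvG_lb (s : List Char) (i : Nat) : ∀ p ∈ pvG s i, i ≤ p.1 := by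
  intro p hp
  rw [pvG] at hp
  split at hp
  · rename_i h
    split at hp
    · split at hp
      · rcases List.mem_cons.mp hp with rfl | hp
        · simp
        · have := pvG_lb _ _ p hp; omega
      · have := pvG_lb _ _ p hp; omega
    · have := pvG_lb _ _ p hp; omega
  · simp at hp
termination_by s.length - i
decreasing_by all_goals (first | (simp only [pvBlank2, List.length_set]; omega) | omega)

theorem pvG_pairwise (s : List Char) (i : Nat) :
    (pvG s i).Pairwise (fun a b => a.1 < b.1) := by
  rw [pvG]
  split
  · rename_i h
    split
    · split
      · rename_i cl j hfind
        refine List.Pairwise.cons ?_ (pvG_pairwise _ _)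
        intro p hp
        have := pvG_lb _ _ p hp
        simp; omega
      · exact pvG_pairwise s (i + 1)
    · exact pvG_pairwise s (i + 1)
  · simp
termination_by s.length - i
decreasing_by all_goals (first | (simp only [pvBlank2, List.length_set]; omega) | omega)


theorem pvOccN_ub {c : Char} {s : List Char} {k q : Nat} (h : q ∈ pvOccN c s k) :
    q < k + s.length := by
  rcases (pvOccN_mem c s k q).mp h with ⟨j, hj, hq, _⟩; omega

theorem pvNotMemOcc {c : Char} {s : List Char} {i : Nat}
    (h : ∀ (hi : i < s.length), s[i] ≠ c) : i ∉ pvOccN c s 0 := by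
  intro hm
  rcases (pvOccN_mem c s 0 i).mp hm with ⟨j, hj, hq, hc⟩
  have : j = i := by omega
  subst this
  exact h hj hc

theorem pvMemOcc {c : Char} {s : List Char} {i : Nat} (hi : i < s.length) (hc : s[i] = c) :
    i ∈ pvOccN c s 0 := (pvOccN_mem c s 0 i).mpr ⟨i, hi, by omega, hc⟩

theorem pvOcc_blank2 {c : Char} (hc : c ≠ '.') (s : List Char) (i j : Nat) :
    pvOccN c (pvBlank2 s i j) 0 = ((pvOccN c s 0).filter (fun q => q ≠ i)).filter (fun q => q ≠ j) := by
  rw [pvBlank2, pvOccN_set hc.symm, pvOccN_set hc.symm]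
  simp

theorem pvOcc_blank2_of_ne {c : Char} (hc : c ≠ '.') {s : List Char} {i j : Nat}
    (h1 : i ∉ pvOccN c s 0) (h2 : j ∉ pvOccN c s 0) :
    pvOccN c (pvBlank2 s i j) 0 = pvOccN c s 0 := by
  rw [pvOcc_blank2 hc, pvFilter_not_mem h1, pvFilter_not_mem h2]

theorem pvFindFrom_some {s : List Char} {cl : Char} {j r : Nat}
    (h : pvFindFrom s cl j = some r) :
    j ≤ r ∧ ∃ (hr : r < s.length), s[r] = cl := by
  rw [pvFindFrom_eq] at h
  have hm : r ∈ (pvOccN cl s 0).filter (fun q => j ≤ q) := by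
    cases hh : (pvOccN cl s 0).filter (fun q => j ≤ q) with
    | nil => rw [hh] at h; simp at h
    | cons a t => rw [hh] at h; simp at h; simp [h]
  have hle : j ≤ r := by have := List.of_mem_filter hm; simpa using this
  have hmem := List.mem_of_mem_filter hm
  rcases (pvOccN_mem cl s 0 r).mp hmem with ⟨j', hj', hq, hc⟩
  have : j' = r := by omega
  subst this
  exact ⟨hle, hj', hc⟩

-- matched type: its spec component pops (i, jc)
theorem pvTypeMatched {s : List Char} {i jc : Nat} {op cl : Char}
    (hi : i < s.length) (hop : s[i] = op) (hopcl : op ≠ cl)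
    (hopd : op ≠ '.') (hcld : cl ≠ '.')
    (hfind : pvFindFrom s cl (i + 1) = some jc) :
    pvTpmN ((pvOccN op s 0).filter (fun q => i ≤ q)) (pvOccN cl s 0)
      = (i, jc) :: pvTpmN ((pvOccN op (pvBlank2 s i jc) 0).filter (fun q => i + 1 ≤ q))
          (pvOccN cl (pvBlank2 s i jc) 0) := by
  obtain ⟨hijc, hjclen, hjccl⟩ := pvFindFrom_some hfind
  rw [pvFindFrom_eq] at hfind
  -- F := filter (i+1 ≤) (occ cl) = jc :: post
  obtain ⟨post, hF⟩ : ∃ post, (pvOccN cl s 0).filter (fun q => i + 1 ≤ q) = jc :: post := by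
    cases hh : (pvOccN cl s 0).filter (fun q => i + 1 ≤ q) with
    | nil => rw [hh] at hfind; simp at hfind
    | cons a t => rw [hh] at hfind; simp at hfind; exact ⟨t, by rw [hfind]⟩
  set P := (pvOccN cl s 0).filter (fun q => q < i + 1) with hP
  have hsplit : pvOccN cl s 0 = P ++ jc :: post := by
    rw [hP, ← hF]
    exact pvFilter_split _ _ (pvOccN_pairwise cl s 0)
  have hPle : ∀ c' ∈ P, c' ≤ i := by
    intro c' hc'
    have := List.of_mem_filter hc'; simp at this; omega
  have hpost_gt : ∀ q ∈ post, jc < q := by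
    have hpw : ((pvOccN cl s 0).filter (fun q => i + 1 ≤ q)).Pairwise (· < ·) :=
      List.Pairwise.filter _ (pvOccN_pairwise cl s 0)
    rw [hF] at hpw
    exact fun q hq => (List.pairwise_cons.mp hpw).1 q hq
  have hiocc : i ∈ pvOccN op s 0 := pvMemOcc hi hop
  set R := (pvOccN op s 0).filter (fun q => i + 1 ≤ q) with hR
  have hcons : (pvOccN op s 0).filter (fun q => i ≤ q) = i :: R :=
    pvFilter_ge_cons (pvOccN_pairwise op s 0) hiocc
  have hRge : ∀ o ∈ R, i + 1 ≤ o := by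
    intro o ho; have := List.of_mem_filter ho; simpa using this
  -- LHS
  have hLHS : pvTpmN ((pvOccN op s 0).filter (fun q => i ≤ q)) (pvOccN cl s 0)
      = (i, jc) :: pvTpmN R post := by
    rw [hcons, hsplit]
    rw [pvTpmN_skip (by
      intro c' hc' o ho
      rcases List.mem_cons.mp ho with rfl | ho
      · exact hPle c' hc'
      · have := hRge o ho; have := hPle c' hc'; omega)]
    rw [pvTpmN, if_neg (by omega)]
  -- RHS occ computations
  have hjc_not_op : jc ∉ pvOccN op s 0 := by
    apply pvNotMemOcc; intro h hc; rw [hjccl] at hc; exact hopcl hc.symm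
  have hi_not_cl : i ∉ pvOccN cl s 0 := by
    apply pvNotMemOcc; intro h hc; rw [hop] at hc; exact hopcl hc
  have hoccop : pvOccN op (pvBlank2 s i jc) 0 = (pvOccN op s 0).filter (fun q => q ≠ i) := by
    rw [pvOcc_blank2 hopd]
    apply pvFilter_not_mem
    intro hmm
    exact hjc_not_op (List.mem_of_mem_filter hmm)
  have hopfilter : (pvOccN op (pvBlank2 s i jc) 0).filter (fun q => i + 1 ≤ q) = R := by
    rw [hoccop, hR, List.filter_comm]
    apply pvFilter_not_mem
    intro hmm
    have := List.of_mem_filter hmm; simp at this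
  have hocccl : pvOccN cl (pvBlank2 s i jc) 0 = P ++ post := by
    rw [pvOcc_blank2 hcld, pvFilter_not_mem hi_not_cl, hsplit]
    rw [List.filter_append, List.filter_cons]
    rw [if_neg (by simp)]
    congr 1
    · apply pvFilter_not_mem
      intro hmm
      have := hPle jc hmm; omega
    · apply pvFilter_not_mem
      intro hmm
      have := hpost_gt jc hmm; omega
  rw [hLHS, hopfilter, hocccl]
  congr 1
  rw [pvTpmN_skip (by
    intro c' hc' o ho
    have := hPle c' hc'; have := hRge o ho; omega)]

-- open with no close: both components empty
theorem pvTypeNone {s : List Char} {i : Nat} {op cl : Char}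
    (hi : i < s.length) (hop : s[i] = op)
    (hfind : pvFindFrom s cl (i + 1) = none) :
    pvTpmN ((pvOccN op s 0).filter (fun q => i ≤ q)) (pvOccN cl s 0) = []
      ∧ pvTpmN ((pvOccN op s 0).filter (fun q => i + 1 ≤ q)) (pvOccN cl s 0) = [] := by
  rw [pvFindFrom_eq] at hfind
  have hnil : (pvOccN cl s 0).filter (fun q => i + 1 ≤ q) = [] :=
    List.head?_eq_none_iff.mp hfind
  have hsplit : pvOccN cl s 0 = (pvOccN cl s 0).filter (fun q => q < i + 1) := by
    conv_lhs => rw [pvFilter_split _ (i + 1) (pvOccN_pairwise cl s 0)]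
    rw [hnil]; simp
  have hPle : ∀ c' ∈ (pvOccN cl s 0).filter (fun q => q < i + 1), c' ≤ i := by
    intro c' hc'
    have := List.of_mem_filter hc'; simp at this; omega
  constructor
  · rw [hsplit]
    have : (pvOccN cl s 0).filter (fun q => q < i + 1)
        = (pvOccN cl s 0).filter (fun q => q < i + 1) ++ [] := by simp
    rw [this, pvTpmN_skip (by
      intro c' hc' o ho
      have h1 := hPle c' hc'
      have h2 := List.of_mem_filter ho; simp at h2; omega), pvTpmN_nil_r]
  · rw [hsplit]
    have : (pvOccN cl s 0).filter (fun q => q < i + 1)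
        = (pvOccN cl s 0).filter (fun q => q < i + 1) ++ [] := by simp
    rw [this, pvTpmN_skip (by
      intro c' hc' o ho
      have h1 := hPle c' hc'
      have h2 := List.of_mem_filter ho; simp at h2; omega), pvTpmN_nil_r]

-- a type untouched by the blanked positions
theorem pvTypeOther {s : List Char} {i jc : Nat} {op cl : Char}
    (hopd : op ≠ '.') (hcld : cl ≠ '.')
    (hiop : ∀ (h : i < s.length), s[i] ≠ op) (hicl : ∀ (h : i < s.length), s[i] ≠ cl)
    (hjop : ∀ (h : jc < s.length), s[jc] ≠ op) (hjcl : ∀ (h : jc < s.length), s[jc] ≠ cl) :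
    pvTpmN ((pvOccN op (pvBlank2 s i jc) 0).filter (fun q => i + 1 ≤ q))
        (pvOccN cl (pvBlank2 s i jc) 0)
      = pvTpmN ((pvOccN op s 0).filter (fun q => i ≤ q)) (pvOccN cl s 0) := by
  rw [pvOcc_blank2_of_ne hopd (pvNotMemOcc hiop) (pvNotMemOcc hjop),
      pvOcc_blank2_of_ne hcld (pvNotMemOcc hicl) (pvNotMemOcc hjcl),
      ← pvFilter_ge_shift (pvNotMemOcc hiop)]

-- ========== main permutation lemma ==========

theorem pvFilterHi {c : Char} {s : List Char} {i : Nat} (h : s.length ≤ i) :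
    (pvOccN c s 0).filter (fun q => i ≤ q) = [] := by
  apply List.filter_eq_nil_iff.mpr
  intro q hq
  have := pvOccN_ub hq
  simp; omega

theorem pvPermMid2 {α : Type} (a : α) (l1 l2 l3 l4 : List α) :
    (l1 ++ (a :: l2) ++ l3 ++ l4).Perm (a :: (l1 ++ l2 ++ l3 ++ l4)) := by
  have := List.perm_middle (a := a) (l₁ := l1) (l₂ := l2 ++ l3 ++ l4)
  simpa [List.append_assoc, List.cons_append] using this

theorem pvPermMid3 {α : Type} (a : α) (l1 l2 l3 l4 : List α) :
    (l1 ++ l2 ++ (a :: l3) ++ l4).Perm (a :: (l1 ++ l2 ++ l3 ++ l4)) := by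
  have := List.perm_middle (a := a) (l₁ := l1 ++ l2) (l₂ := l3 ++ l4)
  simpa [List.append_assoc, List.cons_append] using this

theorem pvPermMid4 {α : Type} (a : α) (l1 l2 l3 l4 : List α) :
    (l1 ++ l2 ++ l3 ++ (a :: l4)).Perm (a :: (l1 ++ l2 ++ l3 ++ l4)) := by
  have := List.perm_middle (a := a) (l₁ := l1 ++ l2 ++ l3) (l₂ := l4)
  simpa [List.append_assoc, List.cons_append] using this

theorem pvSpec_shift {s : List Char} {i : Nat} (h1 : ∀ (h : i < s.length), s[i] ≠ '(')
    (h2 : ∀ (h : i < s.length), s[i] ≠ '[') (h3 : ∀ (h : i < s.length), s[i] ≠ '{')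
    (h4 : ∀ (h : i < s.length), s[i] ≠ '<') :
    pvSpecN s i = pvSpecN s (i + 1) := by
  unfold pvSpecN
  rw [pvFilter_ge_shift (pvNotMemOcc h1), pvFilter_ge_shift (pvNotMemOcc h2),
      pvFilter_ge_shift (pvNotMemOcc h3), pvFilter_ge_shift (pvNotMemOcc h4)]

theorem pvG_perm (s : List Char) (i : Nat) : (pvG s i).Perm (pvSpecN s i) := by
  rw [pvG]
  split
  · rename_i h
    by_cases h1 : s[i] = '('
    · have hoc : pvOC s[i] = some ')' := by rw [h1]; rfl
      rw [hoc]
      dsimp only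
      cases hfind : pvFindFrom s ')' (i + 1) with
      | some jc =>
        obtain ⟨hijc, hjlen, hjcl⟩ := pvFindFrom_some hfind
        have hm := pvTypeMatched h h1 (by decide) (by decide) (by decide) hfind
        unfold pvSpecN
        rw [hm,
           ← pvTypeOther (op := '[') (cl := ']') (jc := jc) (by decide) (by decide)
             (fun _ => by rw [h1]; decide) (fun _ => by rw [h1]; decide)
             (fun _ => by rw [hjcl]; decide) (fun _ => by rw [hjcl]; decide),
           ← pvTypeOther (op := '{') (cl := '}') (jc := jc) (by decide) (by decide)
             (fun _ => by rw [h1]; decide) (fun _ => by rw [h1]; decide)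
             (fun _ => by rw [hjcl]; decide) (fun _ => by rw [hjcl]; decide),
           ← pvTypeOther (op := '<') (cl := '>') (jc := jc) (by decide) (by decide)
             (fun _ => by rw [h1]; decide) (fun _ => by rw [h1]; decide)
             (fun _ => by rw [hjcl]; decide) (fun _ => by rw [hjcl]; decide)]
        simp only [List.cons_append]
        exact (pvG_perm (pvBlank2 s i jc) (i + 1)).cons (i, jc)
      | none =>
        have hn := pvTypeNone h h1 hfind
        have heq : pvSpecN s i = pvSpecN s (i + 1) := by
          unfold pvSpecN
          rw [hn.1, hn.2,
             pvFilter_ge_shift (pvNotMemOcc (c := '[') (fun _ hc => by rw [h1] at hc; exact absurd hc (by decide))),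
             pvFilter_ge_shift (pvNotMemOcc (c := '{') (fun _ hc => by rw [h1] at hc; exact absurd hc (by decide))),
             pvFilter_ge_shift (pvNotMemOcc (c := '<') (fun _ hc => by rw [h1] at hc; exact absurd hc (by decide)))]
        rw [heq]
        exact pvG_perm s (i + 1)
    · by_cases h2 : s[i] = '['
      · have hoc : pvOC s[i] = some ']' := by rw [h2]; rfl
        rw [hoc]
        dsimp only
        cases hfind : pvFindFrom s ']' (i + 1) with
        | some jc =>
          obtain ⟨hijc, hjlen, hjcl⟩ := pvFindFrom_some hfind
          have hm := pvTypeMatched h h2 (by decide) (by decide) (by decide) hfind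
          unfold pvSpecN
          rw [hm,
             ← pvTypeOther (op := '(') (cl := ')') (jc := jc) (by decide) (by decide)
               (fun _ => by rw [h2]; decide) (fun _ => by rw [h2]; decide)
               (fun _ => by rw [hjcl]; decide) (fun _ => by rw [hjcl]; decide),
             ← pvTypeOther (op := '{') (cl := '}') (jc := jc) (by decide) (by decide)
               (fun _ => by rw [h2]; decide) (fun _ => by rw [h2]; decide)
               (fun _ => by rw [hjcl]; decide) (fun _ => by rw [hjcl]; decide),
             ← pvTypeOther (op := '<') (cl := '>') (jc := jc) (by decide) (by decide)
               (fun _ => by rw [h2]; decide) (fun _ => by rw [h2]; decide)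
               (fun _ => by rw [hjcl]; decide) (fun _ => by rw [hjcl]; decide)]
          refine ((pvG_perm (pvBlank2 s i jc) (i + 1)).cons (i, jc)).trans ?_
          exact (pvPermMid2 (i, jc) _ _ _ _).symm
        | none =>
          have hn := pvTypeNone h h2 hfind
          have heq : pvSpecN s i = pvSpecN s (i + 1) := by
            unfold pvSpecN
            rw [hn.1, hn.2,
               pvFilter_ge_shift (pvNotMemOcc (c := '(') (fun _ hc => by rw [h2] at hc; exact absurd hc (by decide))),
               pvFilter_ge_shift (pvNotMemOcc (c := '{') (fun _ hc => by rw [h2] at hc; exact absurd hc (by decide))),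
               pvFilter_ge_shift (pvNotMemOcc (c := '<') (fun _ hc => by rw [h2] at hc; exact absurd hc (by decide)))]
          rw [heq]
          exact pvG_perm s (i + 1)
      · by_cases h3 : s[i] = '{'
        · have hoc : pvOC s[i] = some '}' := by rw [h3]; rfl
          rw [hoc]
          dsimp only
          cases hfind : pvFindFrom s '}' (i + 1) with
          | some jc =>
            obtain ⟨hijc, hjlen, hjcl⟩ := pvFindFrom_some hfind
            have hm := pvTypeMatched h h3 (by decide) (by decide) (by decide) hfind
            unfold pvSpecN
            rw [hm,
               ← pvTypeOther (op := '(') (cl := ')') (jc := jc) (by decide) (by decide)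
                 (fun _ => by rw [h3]; decide) (fun _ => by rw [h3]; decide)
                 (fun _ => by rw [hjcl]; decide) (fun _ => by rw [hjcl]; decide),
               ← pvTypeOther (op := '[') (cl := ']') (jc := jc) (by decide) (by decide)
                 (fun _ => by rw [h3]; decide) (fun _ => by rw [h3]; decide)
                 (fun _ => by rw [hjcl]; decide) (fun _ => by rw [hjcl]; decide),
               ← pvTypeOther (op := '<') (cl := '>') (jc := jc) (by decide) (by decide)
                 (fun _ => by rw [h3]; decide) (fun _ => by rw [h3]; decide)
                 (fun _ => by rw [hjcl]; decide) (fun _ => by rw [hjcl]; decide)]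
            refine ((pvG_perm (pvBlank2 s i jc) (i + 1)).cons (i, jc)).trans ?_
            exact (pvPermMid3 (i, jc) _ _ _ _).symm
          | none =>
            have hn := pvTypeNone h h3 hfind
            have heq : pvSpecN s i = pvSpecN s (i + 1) := by
              unfold pvSpecN
              rw [hn.1, hn.2,
                 pvFilter_ge_shift (pvNotMemOcc (c := '(') (fun _ hc => by rw [h3] at hc; exact absurd hc (by decide))),
                 pvFilter_ge_shift (pvNotMemOcc (c := '[') (fun _ hc => by rw [h3] at hc; exact absurd hc (by decide))),
                 pvFilter_ge_shift (pvNotMemOcc (c := '<') (fun _ hc => by rw [h3] at hc; exact absurd hc (by decide)))]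
            rw [heq]
            exact pvG_perm s (i + 1)
        · by_cases h4 : s[i] = '<'
          · have hoc : pvOC s[i] = some '>' := by rw [h4]; rfl
            rw [hoc]
            dsimp only
            cases hfind : pvFindFrom s '>' (i + 1) with
            | some jc =>
              obtain ⟨hijc, hjlen, hjcl⟩ := pvFindFrom_some hfind
              have hm := pvTypeMatched h h4 (by decide) (by decide) (by decide) hfind
              unfold pvSpecN
              rw [hm,
                 ← pvTypeOther (op := '(') (cl := ')') (jc := jc) (by decide) (by decide)
                   (fun _ => by rw [h4]; decide) (fun _ => by rw [h4]; decide)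
                   (fun _ => by rw [hjcl]; decide) (fun _ => by rw [hjcl]; decide),
                 ← pvTypeOther (op := '[') (cl := ']') (jc := jc) (by decide) (by decide)
                   (fun _ => by rw [h4]; decide) (fun _ => by rw [h4]; decide)
                   (fun _ => by rw [hjcl]; decide) (fun _ => by rw [hjcl]; decide),
                 ← pvTypeOther (op := '{') (cl := '}') (jc := jc) (by decide) (by decide)
                   (fun _ => by rw [h4]; decide) (fun _ => by rw [h4]; decide)
                   (fun _ => by rw [hjcl]; decide) (fun _ => by rw [hjcl]; decide)]
              refine ((pvG_perm (pvBlank2 s i jc) (i + 1)).cons (i, jc)).trans ?_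
              exact (pvPermMid4 (i, jc) _ _ _ _).symm
            | none =>
              have hn := pvTypeNone h h4 hfind
              have heq : pvSpecN s i = pvSpecN s (i + 1) := by
                unfold pvSpecN
                rw [hn.1, hn.2,
                   pvFilter_ge_shift (pvNotMemOcc (c := '(') (fun _ hc => by rw [h4] at hc; exact absurd hc (by decide))),
                   pvFilter_ge_shift (pvNotMemOcc (c := '[') (fun _ hc => by rw [h4] at hc; exact absurd hc (by decide))),
                   pvFilter_ge_shift (pvNotMemOcc (c := '{') (fun _ hc => by rw [h4] at hc; exact absurd hc (by decide)))]
              rw [heq]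
              exact pvG_perm s (i + 1)
          · have hoc : pvOC s[i] = none := by
              rw [pvOC, if_neg h1, if_neg h2, if_neg h3, if_neg h4]
            rw [hoc]
            dsimp only
            rw [pvSpec_shift (fun _ => h1) (fun _ => h2) (fun _ => h3) (fun _ => h4)]
            exact pvG_perm s (i + 1)
  · rename_i h
    unfold pvSpecN
    rw [pvFilterHi (by omega), pvFilterHi (by omega), pvFilterHi (by omega), pvFilterHi (by omega)]
    simp [pvTpmN]
termination_by s.length - i
decreasing_by all_goals (first | (simp only [pvBlank2, List.length_set]; omega) | omega)

-- ========== casts ==========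

theorem pvOcc_eq (c : Char) (cs : List Char) :
    pvOcc c cs = pvCastL (pvOccN c cs 0) := by
  have key : ∀ (xs : List Char) (k : Nat),
      ((PySem.List.enumerate xs (Int.ofNat k)).filter (fun p => p.2 == c)).map (fun p => p.1)
        = pvCastL (pvOccN c xs k) := by
    intro xs
    induction xs with
    | nil => intro k; simp [PySem.List.enumerate_nil, pvOccN, pvCastL]
    | cons x xs ih =>
      intro k
      rw [PySem.List.enumerate_cons]
      rw [List.filter_cons]
      have hstep : (Int.ofNat k) + 1 = Int.ofNat (k + 1) := by simp
      by_cases hx : x = c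
      · rw [if_pos (by simpa using hx)]
        simp only [pvOccN, if_pos hx, List.map_cons, pvCastL_cons]
        rw [hstep, ih (k + 1)]
      · rw [if_neg (by simpa using hx)]
        simp only [pvOccN, if_neg hx]
        rw [hstep, ih (k + 1)]
  have h0 : (0 : Int) = Int.ofNat 0 := rfl
  unfold pvOcc
  rw [h0, key cs 0]

theorem pvTpm_cast (os cs : List Nat) :
    pvTpm (pvCastL os) (pvCastL cs) = (pvTpmN os cs).map pvCast := by
  induction os, cs using pvTpmN.induct with
  | case1 cs => simp [pvTpm, pvTpmN, pvCastL]
  | case2 o os => simp [pvTpm, pvTpmN, pvCastL]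
  | case3 o os c cs hle ih =>
    have h' : (Int.ofNat c) ≤ (Int.ofNat o) := Int.ofNat_le.mpr hle
    rw [pvCastL_cons, pvCastL_cons]
    rw [pvTpm, if_pos h', pvTpmN, if_pos hle, ← pvCastL_cons]
    exact ih
  | case4 o os c cs hle ih =>
    have h' : ¬ (Int.ofNat c) ≤ (Int.ofNat o) := fun hc => hle (Int.ofNat_le.mp hc)
    rw [pvCastL_cons, pvCastL_cons]
    rw [pvTpm, if_neg h', pvTpmN, if_neg hle, List.map_cons]
    exact congrArg₂ List.cons rfl ih

-- ========== A-side reduction ==========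

theorem pvSliceBlank (s : List Char) (i j : Nat) (hij : i < j) (hj : j < s.length) :
    PySem.List.slice s none (some (i : Int)) ++ ['.']
      ++ PySem.List.slice s (some ((i + 1 : Nat) : Int)) (some (j : Int)) ++ ['.']
      ++ PySem.List.slice s (some ((j : Int) + 1)) none = pvBlank2 s i j := by
  have e2 : ((j : Int)) + 1 = ((j + 1 : Nat) : Int) := by push_cast; ring
  rw [PySem.List.slice_to_natCast, e2, PySem.List.slice_natCast, PySem.List.slice_from_natCast]
  have hset1 : s.set i '.' = (s.take i ++ ['.']) ++ s.drop (i + 1) := by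
    rw [List.set_eq_take_cons_drop '.' (by omega)]; simp
  rw [pvBlank2, hset1, List.set_append_right _ _ (by simp; omega)]
  have hlen : (s.take i ++ ['.']).length = i + 1 := by simp; omega
  rw [hlen]
  rw [List.set_eq_take_cons_drop '.' (by simp; omega)]
  rw [List.drop_drop]
  have harith : i + 1 + (j - (i + 1) + 1) = j + 1 := by omega
  rw [harith]
  simp

theorem pvFindClose_eq (s : List Char) (cl : Char) (j : Nat) :
    pvFindClose s cl (PySem.List.pyRange (j : Int) (s.length : Int) 1)
      = Option.map Int.ofNat (pvFindFrom s cl j) := by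
  by_cases h : j < s.length
  · rw [PySem.List.pyRange_one_cons (by exact_mod_cast h)]
    rw [pvFindClose]
    rw [pvFindFrom, dif_pos h]
    have hget : PySem.List.pyGetD s (j : Int) '?' = s[j] := by
      rw [PySem.List.pyGetD_natCast]
      exact List.getD_eq_getElem s '?' h
    rw [hget]
    split
    · rfl
    · have estep : ((j : Int)) + 1 = ((j + 1 : Nat) : Int) := by push_cast; ring
      rw [estep, pvFindClose_eq s cl (j + 1)]
  · rw [PySem.List.pyRange_one_eq_nil (by exact_mod_cast Nat.le_of_not_lt h)]
    rw [pvFindFrom, dif_neg h]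
    rfl
termination_by s.length - j


theorem pvAt (s : List Char) (i : Nat) (hi : i < s.length) :
    PySem.List.pyGetD s (i : Int) '?' = s[i] := by
  rw [PySem.List.pyGetD_natCast]
  exact List.getD_eq_getElem s '?' hi

theorem pvBlank2_length (s : List Char) (i j : Nat) : (pvBlank2 s i j).length = s.length := by
  simp [pvBlank2]

theorem pvBlank2_at (s : List Char) (i j : Nat) (hi : i < s.length) (hij : i ≠ j) :
    PySem.List.pyGetD (pvBlank2 s i j) (i : Int) '?' = '.' := by
  rw [pvAt _ i (by rw [pvBlank2_length]; exact hi)]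
  unfold pvBlank2
  rw [List.getElem_set_ne (by omega)]
  exact List.getElem_set_self (by simpa using hi)

theorem pvBlock_miss (op cl : Char) (st : List (List Int) × List Char) (k : Int)
    (h : PySem.List.pyGetD st.2 k '?' ≠ op) : pvBlock op cl st k = st := by
  rw [pvBlock, if_neg h]

theorem pvBlock_fire (op cl : Char) (acc : List (List Int)) (s : List Char) (i : Nat)
    (hi : i < s.length) (hop : s[i] = op) :
    pvBlock op cl (acc, s) (i : Int) =
      match pvFindFrom s cl (i + 1) with
      | some jc => (acc ++ [[(i : Int), (jc : Int)], [(jc : Int), (i : Int)]], pvBlank2 s i jc)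
      | none => (acc, s) := by
  rw [pvBlock, if_pos (by rw [pvAt s i hi, hop])]
  have e1 : ((i : Int)) + 1 = ((i + 1 : Nat) : Int) := by push_cast; ring
  dsimp only
  rw [e1, pvFindClose_eq]
  cases hfind : pvFindFrom s cl (i + 1) with
  | none => rfl
  | some jc =>
    obtain ⟨hijc, hjlen, hjcl⟩ := pvFindFrom_some hfind
    simp only [Option.map_some, Int.ofNat_eq_natCast]
    rw [pvSliceBlank s i jc (by omega) hjlen]

theorem pvLoopA (s : List Char) (i : Nat) (acc : List (List Int)) :
    ((PySem.List.pyRange (i : Int) (s.length : Int) 1).foldl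
      (fun st k => pvBlock '<' '>' (pvBlock '{' '}' (pvBlock '[' ']' (pvBlock '(' ')' st k) k) k) k)
      (acc, s)).1 = acc ++ pvExpand ((pvG s i).map pvCast) := by
  by_cases h : i < s.length
  · rw [PySem.List.pyRange_one_cons (by exact_mod_cast h), List.foldl_cons]
    by_cases h1 : s[i] = '('
    · have hat : PySem.List.pyGetD s (i : Int) '?' = '(' := by rw [pvAt s i h, h1]
      rw [pvBlock_fire '(' ')' acc s i h h1]
      cases hfind : pvFindFrom s ')' (i + 1) with
      | some jc =>
        obtain ⟨hijc, hjlen, hjcl⟩ := pvFindFrom_some hfind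
        dsimp only
        have hdot : PySem.List.pyGetD (pvBlank2 s i jc) (i : Int) '?' = '.' := pvBlank2_at s i jc h (by omega)
        rw [pvBlock_miss '[' ']' (acc ++ [[(i : Int), (jc : Int)], [(jc : Int), (i : Int)]], pvBlank2 s i jc) (i : Int) (by dsimp only; rw [hdot]; decide)]
        rw [pvBlock_miss '{' '}' (acc ++ [[(i : Int), (jc : Int)], [(jc : Int), (i : Int)]], pvBlank2 s i jc) (i : Int) (by dsimp only; rw [hdot]; decide)]
        rw [pvBlock_miss '<' '>' (acc ++ [[(i : Int), (jc : Int)], [(jc : Int), (i : Int)]], pvBlank2 s i jc) (i : Int) (by dsimp only; rw [hdot]; decide)]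
        have e1 : ((i : Int)) + 1 = ((i + 1 : Nat) : Int) := by push_cast; ring
        have hlen : ((pvBlank2 s i jc).length : Int) = (s.length : Int) := by rw [pvBlank2_length]
        rw [e1, ← hlen]
        rw [pvLoopA (pvBlank2 s i jc) (i + 1) (acc ++ [[(i : Int), (jc : Int)], [(jc : Int), (i : Int)]])]
        have hG : pvG s i = (i, jc) :: pvG (pvBlank2 s i jc) (i + 1) := by
          rw [pvG, dif_pos h]
          have hoc : pvOC s[i] = some ')' := by rw [h1]; rfl
          rw [hoc]
          dsimp only
          rw [hfind]
        rw [hG]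
        simp only [List.map_cons, pvExpand, List.flatMap_cons, pvCast, Int.ofNat_eq_natCast]
        simp [List.append_assoc]
      | none =>
        dsimp only
        rw [pvBlock_miss '[' ']' (acc, s) (i : Int) (by rw [hat]; decide)]
        rw [pvBlock_miss '{' '}' (acc, s) (i : Int) (by rw [hat]; decide)]
        rw [pvBlock_miss '<' '>' (acc, s) (i : Int) (by rw [hat]; decide)]
        have e1 : ((i : Int)) + 1 = ((i + 1 : Nat) : Int) := by push_cast; ring
        rw [e1, pvLoopA s (i + 1) acc]
        have hG : pvG s i = pvG s (i + 1) := by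
          rw [pvG, dif_pos h]
          have hoc : pvOC s[i] = some ')' := by rw [h1]; rfl
          rw [hoc]
          dsimp only
          rw [hfind]
        rw [hG]
    · by_cases h2 : s[i] = '['
      · have hat : PySem.List.pyGetD s (i : Int) '?' = '[' := by rw [pvAt s i h, h2]
        rw [pvBlock_miss '(' ')' (acc, s) (i : Int) (by rw [hat]; decide)]
        rw [pvBlock_fire '[' ']' acc s i h h2]
        cases hfind : pvFindFrom s ']' (i + 1) with
        | some jc =>
          obtain ⟨hijc, hjlen, hjcl⟩ := pvFindFrom_some hfind
          dsimp only
          have hdot : PySem.List.pyGetD (pvBlank2 s i jc) (i : Int) '?' = '.' := pvBlank2_at s i jc h (by omega)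
          rw [pvBlock_miss '{' '}' (acc ++ [[(i : Int), (jc : Int)], [(jc : Int), (i : Int)]], pvBlank2 s i jc) (i : Int) (by dsimp only; rw [hdot]; decide)]
          rw [pvBlock_miss '<' '>' (acc ++ [[(i : Int), (jc : Int)], [(jc : Int), (i : Int)]], pvBlank2 s i jc) (i : Int) (by dsimp only; rw [hdot]; decide)]
          have e1 : ((i : Int)) + 1 = ((i + 1 : Nat) : Int) := by push_cast; ring
          have hlen : ((pvBlank2 s i jc).length : Int) = (s.length : Int) := by rw [pvBlank2_length]
          rw [e1, ← hlen]
          rw [pvLoopA (pvBlank2 s i jc) (i + 1) (acc ++ [[(i : Int), (jc : Int)], [(jc : Int), (i : Int)]])]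
          have hG : pvG s i = (i, jc) :: pvG (pvBlank2 s i jc) (i + 1) := by
            rw [pvG, dif_pos h]
            have hoc : pvOC s[i] = some ']' := by rw [h2]; rfl
            rw [hoc]
            dsimp only
            rw [hfind]
          rw [hG]
          simp only [List.map_cons, pvExpand, List.flatMap_cons, pvCast, Int.ofNat_eq_natCast]
          simp [List.append_assoc]
        | none =>
          dsimp only
          rw [pvBlock_miss '{' '}' (acc, s) (i : Int) (by rw [hat]; decide)]
          rw [pvBlock_miss '<' '>' (acc, s) (i : Int) (by rw [hat]; decide)]
          have e1 : ((i : Int)) + 1 = ((i + 1 : Nat) : Int) := by push_cast; ring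
          rw [e1, pvLoopA s (i + 1) acc]
          have hG : pvG s i = pvG s (i + 1) := by
            rw [pvG, dif_pos h]
            have hoc : pvOC s[i] = some ']' := by rw [h2]; rfl
            rw [hoc]
            dsimp only
            rw [hfind]
          rw [hG]
      · by_cases h3 : s[i] = '{'
        · have hat : PySem.List.pyGetD s (i : Int) '?' = '{' := by rw [pvAt s i h, h3]
          rw [pvBlock_miss '(' ')' (acc, s) (i : Int) (by rw [hat]; decide)]
          rw [pvBlock_miss '[' ']' (acc, s) (i : Int) (by rw [hat]; decide)]
          rw [pvBlock_fire '{' '}' acc s i h h3]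
          cases hfind : pvFindFrom s '}' (i + 1) with
          | some jc =>
            obtain ⟨hijc, hjlen, hjcl⟩ := pvFindFrom_some hfind
            dsimp only
            have hdot : PySem.List.pyGetD (pvBlank2 s i jc) (i : Int) '?' = '.' := pvBlank2_at s i jc h (by omega)
            rw [pvBlock_miss '<' '>' (acc ++ [[(i : Int), (jc : Int)], [(jc : Int), (i : Int)]], pvBlank2 s i jc) (i : Int) (by dsimp only; rw [hdot]; decide)]
            have e1 : ((i : Int)) + 1 = ((i + 1 : Nat) : Int) := by push_cast; ring
            have hlen : ((pvBlank2 s i jc).length : Int) = (s.length : Int) := by rw [pvBlank2_length]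
            rw [e1, ← hlen]
            rw [pvLoopA (pvBlank2 s i jc) (i + 1) (acc ++ [[(i : Int), (jc : Int)], [(jc : Int), (i : Int)]])]
            have hG : pvG s i = (i, jc) :: pvG (pvBlank2 s i jc) (i + 1) := by
              rw [pvG, dif_pos h]
              have hoc : pvOC s[i] = some '}' := by rw [h3]; rfl
              rw [hoc]
              dsimp only
              rw [hfind]
            rw [hG]
            simp only [List.map_cons, pvExpand, List.flatMap_cons, pvCast, Int.ofNat_eq_natCast]
            simp [List.append_assoc]
          | none =>
            dsimp only
            rw [pvBlock_miss '<' '>' (acc, s) (i : Int) (by rw [hat]; decide)]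
            have e1 : ((i : Int)) + 1 = ((i + 1 : Nat) : Int) := by push_cast; ring
            rw [e1, pvLoopA s (i + 1) acc]
            have hG : pvG s i = pvG s (i + 1) := by
              rw [pvG, dif_pos h]
              have hoc : pvOC s[i] = some '}' := by rw [h3]; rfl
              rw [hoc]
              dsimp only
              rw [hfind]
            rw [hG]
        · by_cases h4 : s[i] = '<'
          · have hat : PySem.List.pyGetD s (i : Int) '?' = '<' := by rw [pvAt s i h, h4]
            rw [pvBlock_miss '(' ')' (acc, s) (i : Int) (by rw [hat]; decide)]
            rw [pvBlock_miss '[' ']' (acc, s) (i : Int) (by rw [hat]; decide)]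
            rw [pvBlock_miss '{' '}' (acc, s) (i : Int) (by rw [hat]; decide)]
            rw [pvBlock_fire '<' '>' acc s i h h4]
            cases hfind : pvFindFrom s '>' (i + 1) with
            | some jc =>
              obtain ⟨hijc, hjlen, hjcl⟩ := pvFindFrom_some hfind
              dsimp only
              have hdot : PySem.List.pyGetD (pvBlank2 s i jc) (i : Int) '?' = '.' := pvBlank2_at s i jc h (by omega)
              have e1 : ((i : Int)) + 1 = ((i + 1 : Nat) : Int) := by push_cast; ring
              have hlen : ((pvBlank2 s i jc).length : Int) = (s.length : Int) := by rw [pvBlank2_length]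
              rw [e1, ← hlen]
              rw [pvLoopA (pvBlank2 s i jc) (i + 1) (acc ++ [[(i : Int), (jc : Int)], [(jc : Int), (i : Int)]])]
              have hG : pvG s i = (i, jc) :: pvG (pvBlank2 s i jc) (i + 1) := by
                rw [pvG, dif_pos h]
                have hoc : pvOC s[i] = some '>' := by rw [h4]; rfl
                rw [hoc]
                dsimp only
                rw [hfind]
              rw [hG]
              simp only [List.map_cons, pvExpand, List.flatMap_cons, pvCast, Int.ofNat_eq_natCast]
              simp [List.append_assoc]
            | none =>
              dsimp only
              have e1 : ((i : Int)) + 1 = ((i + 1 : Nat) : Int) := by push_cast; ring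
              rw [e1, pvLoopA s (i + 1) acc]
              have hG : pvG s i = pvG s (i + 1) := by
                rw [pvG, dif_pos h]
                have hoc : pvOC s[i] = some '>' := by rw [h4]; rfl
                rw [hoc]
                dsimp only
                rw [hfind]
              rw [hG]
          · have hat : PySem.List.pyGetD s (i : Int) '?' = s[i] := pvAt s i h
            rw [pvBlock_miss '(' ')' (acc, s) (i : Int) (by rw [hat]; exact h1),
                pvBlock_miss '[' ']' (acc, s) (i : Int) (by rw [hat]; exact h2),
                pvBlock_miss '{' '}' (acc, s) (i : Int) (by rw [hat]; exact h3),
                pvBlock_miss '<' '>' (acc, s) (i : Int) (by rw [hat]; exact h4)]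
            have e1 : ((i : Int)) + 1 = ((i + 1 : Nat) : Int) := by push_cast; ring
            rw [e1, pvLoopA s (i + 1) acc]
            have hG : pvG s i = pvG s (i + 1) := by
              rw [pvG, dif_pos h]
              have hoc : pvOC s[i] = none := by rw [pvOC, if_neg h1, if_neg h2, if_neg h3, if_neg h4]
              rw [hoc]
            rw [hG]
  · rw [PySem.List.pyRange_one_eq_nil (by exact_mod_cast Nat.le_of_not_lt h)]
    rw [pvG, dif_neg h]
    simp [pvExpand]
termination_by s.length - i
decreasing_by all_goals (first | (simp only [pvBlank2, List.length_set]; omega) | omega)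

-- ========== sorted ==========

theorem pvSorted_eq (cs : List Char) :
    PySem.List.sorted
      (pvTpm (pvOcc '(' cs) (pvOcc ')' cs) ++ pvTpm (pvOcc '[' cs) (pvOcc ']' cs)
        ++ pvTpm (pvOcc '{' cs) (pvOcc '}' cs) ++ pvTpm (pvOcc '<' cs) (pvOcc '>' cs))
      (fun p => p.1) false = (pvG cs 0).map pvCast := by
  apply PySem.List.sorted_eq_of_perm_of_pairwise_lt
  · refine List.Perm.trans (List.Perm.map pvCast (pvG_perm cs 0)) ?_
    apply List.Perm.of_eq
    unfold pvSpecN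
    have hf : ∀ c : Char, (pvOccN c cs 0).filter (fun q => 0 ≤ q) = pvOccN c cs 0 := by
      intro c; apply List.filter_eq_self.mpr; intro q hq; simp
    simp only [List.map_append]
    rw [hf, hf, hf, hf]
    rw [← pvTpm_cast, ← pvTpm_cast, ← pvTpm_cast, ← pvTpm_cast]
    rw [← pvOcc_eq, ← pvOcc_eq, ← pvOcc_eq, ← pvOcc_eq,
        ← pvOcc_eq, ← pvOcc_eq, ← pvOcc_eq, ← pvOcc_eq]
  · have hpw := pvG_pairwise cs 0
    refine List.Pairwise.map pvCast ?_ hpw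
    intro a b hab
    simpa [pvCast] using Int.ofNat_lt.mpr hab

-- ========== final assembly ==========

theorem pvFoldA (l : List (List Int)) (e a : List (List Int)) :
    l.foldl (fun st pr => (st.1 ++ [pr], st.2 ++ [[1, 1]])) (e, a)
      = (e ++ l, a ++ l.map (fun _ => [1, 1])) := by
  induction l generalizing e a with
  | nil => simp
  | cons x t ih => simp [List.foldl_cons, ih]

theorem pvFoldB (l : List (Int × Int)) (e a : List (List Int)) :
    l.foldl (fun st p => (st.1 ++ [[p.1, p.2], [p.2, p.1]], st.2 ++ [[1, 1], [1, 1]]))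
      (e, a) = (e ++ pvExpand l, a ++ l.flatMap (fun _ => [[1, 1], [1, 1]])) := by
  induction l generalizing e a with
  | nil => simp [pvExpand]
  | cons x t ih => simp [List.foldl_cons, ih, pvExpand]

theorem pvOnes (l : List (Int × Int)) :
    (pvExpand l).map (fun _ => ([1, 1] : List Int)) = l.flatMap (fun _ => [[1, 1], [1, 1]]) := by
  induction l with
  | nil => simp [pvExpand]
  | cons x t ih => simp [pvExpand, List.flatMap_cons] at ih ⊢; exact ih

theorem pvZeros (n : Int) :
    (PySem.List.pyRange 0 (n - 1) 1).map (fun _ => ([0, 0] : List Int))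
        ++ (PySem.List.pyRange 0 (n - 1) 1).map (fun _ => ([0, 0] : List Int))
      = (PySem.List.pyRange 0 (2 * (n - 1)) 1).map (fun _ => ([0, 0] : List Int)) := by
  rw [List.map_const', List.map_const', List.replicate_append_replicate]
  simp only [PySem.List.length_pyRange_one]
  congr 1
  omega

theorem ss2edge_eq_alt (target_ss : String) : ss2edge target_ss = ss2edge_alt target_ss := by
  unfold ss2edge ss2edge_alt
  dsimp only
  rw [pvFoldA, pvFoldB, pvSorted_eq]
  have hpair : pvSS2pair target_ss.toList = pvExpand ((pvG target_ss.toList 0).map pvCast) := by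
    unfold pvSS2pair
    rw [show (0 : Int) = ((0 : Nat) : Int) from rfl, pvLoopA target_ss.toList 0 []]
    simp
  rw [hpair, pvOnes, pvZeros]

-- ===== VERDICT (by name: the statement is the Claim_ definition above) =====
theorem ss2edge_spec : Claim_equal_ss2edge := by
  intro target_ss _
  unfold Spec_ss2edge
  exact ss2edge_eq_alt target_ss
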